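-- pv_equiv track=rewrite | github.com/DragunWF/Competitive-Programming | CodeWars/python/6_kyu/simple_fun_332.py | catch_thief
-- ===== SOURCE A (Python) =====
-- def catch_thief(queue: str) -> int:
--     caught_thieves = 0
--     watched = [False for i in range(len(queue))]
--     for i, char in enumerate(queue):
--         if char.isdigit():
--             watched[i] = True
--             watch_range = int(char)
--             for j in range(i, max(i - watch_range - 1, -1), -1):
--                 watched[j] = True
--             for j in range(i, min(i + watch_range + 1, len(queue))):
--                 watched[j] = True
--     for i, char in enumerate(queue):
--         if char == "X" and watched[i]:
--             caught_thieves += 1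
--     return caught_thieves
-- ===== SOURCE B (Python) =====
-- def catch_thief(queue: str) -> int:
--     return sum(
--         1
--         for i, ch in enumerate(queue)
--         if ch == "X" and any(
--             g.isdigit() and abs(i - j) <= int(g)
--             for j, g in enumerate(queue)
--         )
--     )
-- ===== Notes on version B (the rewrite author's own statement) =====
-- stated objective: simpler
-- what changed: B drops A's boolean coverage table and its two flooding range-loops per guard: it is a single comprehension counting each thief position for which some guard g at distance abs(i-j) <= int(g) exists.
import Mathlib
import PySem

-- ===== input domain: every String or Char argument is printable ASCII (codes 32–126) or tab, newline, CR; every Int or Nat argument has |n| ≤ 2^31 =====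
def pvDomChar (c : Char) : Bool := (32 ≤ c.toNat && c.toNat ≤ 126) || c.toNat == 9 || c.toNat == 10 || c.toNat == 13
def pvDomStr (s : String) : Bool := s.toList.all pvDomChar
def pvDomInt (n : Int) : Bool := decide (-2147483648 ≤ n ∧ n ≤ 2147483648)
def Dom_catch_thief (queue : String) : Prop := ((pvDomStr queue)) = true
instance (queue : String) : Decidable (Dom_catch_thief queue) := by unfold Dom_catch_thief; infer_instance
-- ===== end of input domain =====

-- B replaces A's boolean coverage table and per-guard flooding loops by a single
-- count of the thief positions that some guard reaches (abs(i-j) <= int(g)): simpler, same results.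


-- ===== PORT A =====
-- body of A's guard loop: watched[i] = True; then the downward and upward range loops
-- (every watched[j] = True assignment has 0 ≤ j < len(queue), so pySetD is exact here)
def catchStep (n : Int) (w : List Bool) (p : Int × Char) : List Bool :=
  if PySem.Chars.isdigit p.2 then
    let w1 := PySem.List.pySetD w p.1 true
    let wr := (PySem.Int.ofChars? [p.2]).getD 0   -- int(char); p.2 is a digit so int() never raises
    let w2 := (PySem.List.pyRange p.1 (max (p.1 - wr - 1) (-1)) (-1)).foldl
                (fun w j => PySem.List.pySetD w j true) w1
    (PySem.List.pyRange p.1 (min (p.1 + wr + 1) n) 1).foldl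
      (fun w j => PySem.List.pySetD w j true) w2
  else w

def catch_thief (queue : String) : Int :=
  let s := queue.toList
  let n : Int := s.length
  let watched0 : List Bool := (PySem.List.pyRange 0 n 1).map (fun _ => false)
  let watched := (PySem.List.enumerate s).foldl (catchStep n) watched0
  -- watched[i] is always an in-range read, so the total pyGetD is exact
  (PySem.List.enumerate s).foldl
    (fun acc p => if p.2 == 'X' && PySem.List.pyGetD watched p.1 false then acc + 1 else acc) 0

-- ===== PORT B =====
def catch_thief_alt (queue : String) : Int :=
  let s := queue.toList
  ((PySem.List.enumerate s).countP (fun p =>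
    p.2 == 'X' && (PySem.List.enumerate s).any (fun q =>
      PySem.Chars.isdigit q.2 &&
        decide (|p.1 - q.1| ≤ (PySem.Int.ofChars? [q.2]).getD 0)) ) : Int)

-- ===== PRECONDITION & SPEC =====
def Spec_catch_thief (queue : String) (out : Int) : Prop := out = catch_thief_alt queue
instance (queue : String) (out : Int) : Decidable (Spec_catch_thief queue out) := by unfold Spec_catch_thief; infer_instance

-- ===== CLAIM (what is proved, stated in full; the proofs are below) =====
def Claim_equal_catch_thief : Prop := ∀ (queue : String), Dom_catch_thief queue → Spec_catch_thief queue (catch_thief queue)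

-- ===== LEMMAS AND PROOFS =====

-- int(c) for a digit character c
lemma ofChars_digit (c : Char) (h : PySem.Chars.isdigit c = true) :
    PySem.Int.ofChars? [c] = some ((c.toNat : Int) - 48) := by
  simp [PySem.Chars.isdigit, Char.le_def] at h
  obtain ⟨h1, h2⟩ := h
  have h48 : 48 ≤ c.toNat := by
    have := UInt32.le_iff_toNat_le.mp h1; simpa using this
  have h57 : c.toNat ≤ 57 := by
    have := UInt32.le_iff_toNat_le.mp h2; simpa using this
  have hc : c = Char.ofNat c.toNat := (Char.ofNat_toNat c).symm
  interval_cases h : c.toNat <;> rw [hc] <;> decide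

lemma digit_val_nonneg (c : Char) (h : PySem.Chars.isdigit c = true) :
    0 ≤ (PySem.Int.ofChars? [c]).getD 0 := by
  rw [ofChars_digit c h]
  simp [PySem.Chars.isdigit, Char.le_def] at h
  have h48 : 48 ≤ c.toNat := by
    have := UInt32.le_iff_toNat_le.mp h.1; simpa using this
  simp only [Option.getD_some]
  omega

lemma getD_pySetD_true (w : List Bool) (i : Int) (j : Nat)
    (hi0 : 0 ≤ i) (hj : j < w.length) :
    (PySem.List.pyGetD (PySem.List.pySetD w i true) (↑j) false = true ↔
      (PySem.List.pyGetD w (↑j) false = true ∨ (j : Int) = i)) := by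
  rw [PySem.List.pySetD_of_nonneg w true hi0,
      PySem.List.pyGetD_eq_getElem _ _ (by positivity)
        (by rw [List.length_set]; exact_mod_cast hj),
      PySem.List.pyGetD_eq_getElem _ _ (by positivity) (by exact_mod_cast hj)]
  simp only [Int.toNat_natCast]
  rw [List.getElem_set]
  by_cases hij : i.toNat = j
  · have hji : (j : Int) = i := by omega
    simp [hij, hji]
  · have hji : (j : Int) ≠ i := by omega
    simp [hij, hji]

lemma setfold_getD (l : List Int) (w : List Bool) (j : Nat)
    (hl : ∀ i ∈ l, 0 ≤ i ∧ i < (w.length : Int)) (hj : j < w.length) :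
    ((l.foldl (fun w i => PySem.List.pySetD w i true) w)).length = w.length ∧
    (PySem.List.pyGetD (l.foldl (fun w i => PySem.List.pySetD w i true) w) (↑j) false = true ↔
      (PySem.List.pyGetD w (↑j) false = true ∨ (j : Int) ∈ l)) := by
  induction l generalizing w with
  | nil => simp
  | cons x xs ih =>
    have hx := hl x (List.mem_cons_self ..)
    have hlen : (PySem.List.pySetD w x true).length = w.length := PySem.List.length_pySetD ..
    have ih' := ih (PySem.List.pySetD w x true)
      (fun i hi => by rw [hlen]; exact hl i (List.mem_cons_of_mem _ hi)) (by omega)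
    refine ⟨by simpa [hlen] using ih'.1, ?_⟩
    rw [List.foldl_cons, ih'.2, getD_pySetD_true w x j hx.1 hj]
    simp [List.mem_cons]
    tauto

lemma catchStep_getD (n : Int) (w : List Bool) (p : Int × Char) (j : Nat)
    (hn : n = (w.length : Int)) (hp : 0 ≤ p.1 ∧ p.1 < n) (hj : j < w.length) :
    (catchStep n w p).length = w.length ∧
    (PySem.List.pyGetD (catchStep n w p) (↑j) false = true ↔
      (PySem.List.pyGetD w (↑j) false = true ∨
        (PySem.Chars.isdigit p.2 = true ∧ |p.1 - (↑j : Int)| ≤ (PySem.Int.ofChars? [p.2]).getD 0))) := by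
  unfold catchStep
  by_cases hd : PySem.Chars.isdigit p.2 = true
  · simp only [hd, if_pos]
    set wr := (PySem.Int.ofChars? [p.2]).getD 0 with hwr
    have hwr0 : 0 ≤ wr := digit_val_nonneg p.2 hd
    have hlen1 : (PySem.List.pySetD w p.1 true).length = w.length := PySem.List.length_pySetD ..
    have hdown := setfold_getD (PySem.List.pyRange p.1 (max (p.1 - wr - 1) (-1)) (-1))
      (PySem.List.pySetD w p.1 true) j
      (fun i hi => by
        rw [PySem.List.mem_pyRange_neg_one] at hi
        rw [hlen1]; omega) (by omega)
    have hup := setfold_getD (PySem.List.pyRange p.1 (min (p.1 + wr + 1) n) 1) _ j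
      (fun i hi => by
        rw [PySem.List.mem_pyRange_one] at hi
        rw [hdown.1, hlen1]; omega) (by rw [hdown.1]; omega)
    refine ⟨by rw [hup.1, hdown.1, hlen1], ?_⟩
    rw [hup.2, hdown.2, getD_pySetD_true w p.1 j hp.1 hj]
    rw [PySem.List.mem_pyRange_one, PySem.List.mem_pyRange_neg_one]
    rw [abs_sub_le_iff]
    simp only [true_and]
    constructor
    · rintro (((h | h) | ⟨h1, h2⟩) | ⟨h1, h2⟩)
      · exact Or.inl h
      · exact Or.inr ⟨by omega, by omega⟩
      · exact Or.inr ⟨by omega, by omega⟩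
      · exact Or.inr ⟨by omega, by omega⟩
    · rintro (h | ⟨h1, h2⟩)
      · exact Or.inl (Or.inl (Or.inl h))
      · rcases lt_trichotomy ((j : Int)) p.1 with hlt | heq | hgt
        · exact Or.inl (Or.inr ⟨by omega, by omega⟩)
        · exact Or.inl (Or.inl (Or.inr heq))
        · exact Or.inr ⟨by omega, by omega⟩
  · simp [hd]

lemma foldl_catchStep_getD (L : List (Int × Char)) (n : Int) (w : List Bool) (j : Nat)
    (hn : n = (w.length : Int)) (hL : ∀ p ∈ L, 0 ≤ p.1 ∧ p.1 < n) (hj : j < w.length) :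
    (L.foldl (catchStep n) w).length = w.length ∧
    (PySem.List.pyGetD (L.foldl (catchStep n) w) (↑j) false = true ↔
      (PySem.List.pyGetD w (↑j) false = true ∨
        ∃ p ∈ L, PySem.Chars.isdigit p.2 = true ∧
          |p.1 - (↑j : Int)| ≤ (PySem.Int.ofChars? [p.2]).getD 0)) := by
  induction L generalizing w with
  | nil => simp
  | cons q qs ih =>
    have hstep := catchStep_getD n w q j hn (hL q (List.mem_cons_self ..)) hj
    have ih' := ih (catchStep n w q) (by rw [hstep.1]; exact hn)
      (fun p hp => hL p (List.mem_cons_of_mem _ hp)) (by omega)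
    refine ⟨by rw [List.foldl_cons, ih'.1, hstep.1], ?_⟩
    rw [List.foldl_cons, ih'.2, hstep.2]
    simp only [List.mem_cons]
    constructor
    · rintro ((h | h) | ⟨p, hp, h⟩)
      · exact Or.inl h
      · exact Or.inr ⟨q, Or.inl rfl, h⟩
      · exact Or.inr ⟨p, Or.inr hp, h⟩
    · rintro (h | ⟨p, (rfl | hp), h⟩)
      · exact Or.inl (Or.inl h)
      · exact Or.inl (Or.inr h)
      · exact Or.inr ⟨p, hp, h⟩

lemma watched0_length (s : List Char) :
    ((PySem.List.pyRange 0 (s.length : Int) 1).map (fun _ => false)).length = s.length := by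
  simp [PySem.List.length_pyRange_one]

lemma count_eq (s : List Char) :
    (PySem.List.enumerate s).foldl
      (fun acc p => if p.2 == 'X' && PySem.List.pyGetD
          ((PySem.List.enumerate s).foldl (catchStep (s.length : Int))
            ((PySem.List.pyRange 0 (s.length : Int) 1).map (fun _ => false))) p.1 false
        then acc + 1 else acc) 0
    = ((PySem.List.enumerate s).countP (fun p =>
        p.2 == 'X' && (PySem.List.enumerate s).any (fun q =>
          PySem.Chars.isdigit q.2 &&
            decide (|p.1 - q.1| ≤ (PySem.Int.ofChars? [q.2]).getD 0))) : Int) := by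
  rw [PySem.List.foldl_if_add_one, zero_add]
  rw [Int.natCast_inj]
  apply List.countP_congr
  intro p hp
  rw [PySem.List.mem_enumerate_iff] at hp
  obtain ⟨k, hk, rfl⟩ := hp
  simp only [zero_add]
  have hmem : ∀ q ∈ PySem.List.enumerate s 0, 0 ≤ q.1 ∧ q.1 < (s.length : Int) := by
    intro q hq
    rw [PySem.List.mem_enumerate_iff] at hq
    obtain ⟨m, hm, rfl⟩ := hq
    have hm' : (m : Int) < (s.length : Int) := by exact_mod_cast hm
    exact ⟨by omega, by omega⟩
  have hget0 : PySem.List.pyGetD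
      ((PySem.List.pyRange 0 (s.length : Int) 1).map (fun _ => false)) (↑k) false = false := by
    rw [PySem.List.pyGetD_eq_getElem _ _ (by positivity)
      (by rw [watched0_length]; exact_mod_cast hk)]
    simp
  have hmain := foldl_catchStep_getD (PySem.List.enumerate s 0) (s.length : Int)
    ((PySem.List.pyRange 0 (s.length : Int) 1).map (fun _ => false)) k
    (by rw [watched0_length]) hmem (by rw [watched0_length]; exact hk)
  rw [Bool.eq_iff_iff]
  simp only [Bool.and_eq_true, List.any_eq_true, decide_eq_true_eq]
  rw [hmain.2, hget0]
  simp only [iff_true, Bool.false_eq_true, false_or]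
  constructor <;> rintro ⟨hx, q, hq, hqd, hqr⟩ <;>
    exact ⟨hx, q, hq, hqd, by rw [abs_sub_comm]; exact hqr⟩

theorem catch_thief_spec : Claim_equal_catch_thief := by
  intro queue _
  unfold Spec_catch_thief catch_thief catch_thief_alt
  exact count_eq queue.toList
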